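-- pv_equiv track=rewrite | github.com/yd5768365-hue/cae-cli | cae/ai/diagnose.py | _count_supporting_sources
-- ===== SOURCE A (Python) =====
-- def _count_supporting_sources(
--     sources: list[tuple[str, list[str]]],
--     keywords: list[str],
-- ) -> int:
--     lowered_keywords = [kw.lower() for kw in keywords if kw]
--     if not lowered_keywords:
--         return 0
--
--     support = 0
--     for _, src_lines in sources:
--         found = False
--         for raw in src_lines:
--             lowered = raw.lower()
--             if any(kw in lowered for kw in lowered_keywords):
--                 found = True
--                 break
--         if found:
--             support += 1
--     return support
-- ===== SOURCE B (Python) =====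
-- def _count_supporting_sources(
--     sources: list[tuple[str, list[str]]],
--     keywords: list[str],
-- ) -> int:
--     # Deduplicated lowered keywords, keyword-outer rounds over a shrinking
--     # worklist of still-unsupported (pre-lowered) sources.
--     kws = list(dict.fromkeys(kw.lower() for kw in keywords if kw))
--     remaining = [[line.lower() for line in lines] for _, lines in sources]
--     hits = 0
--     for kw in kws:
--         still = []
--         for src in remaining:
--             if any(kw in line for line in src):
--                 hits += 1
--             else:
--                 still.append(src)
--         remaining = still
--     return hits
-- ===== Notes on version B (the rewrite author's own statement) =====
-- stated objective: alternative
-- what changed: Instead of A's per-source inner scan with a found-flag and break, B dedupes the lowered keywords and runs keyword-outer rounds over a shrinking worklist of pre-lowered sources: each keyword counts and removes every still-unsupported source it hits, so resolved sources and duplicate keywords are never examined again.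
import Mathlib
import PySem

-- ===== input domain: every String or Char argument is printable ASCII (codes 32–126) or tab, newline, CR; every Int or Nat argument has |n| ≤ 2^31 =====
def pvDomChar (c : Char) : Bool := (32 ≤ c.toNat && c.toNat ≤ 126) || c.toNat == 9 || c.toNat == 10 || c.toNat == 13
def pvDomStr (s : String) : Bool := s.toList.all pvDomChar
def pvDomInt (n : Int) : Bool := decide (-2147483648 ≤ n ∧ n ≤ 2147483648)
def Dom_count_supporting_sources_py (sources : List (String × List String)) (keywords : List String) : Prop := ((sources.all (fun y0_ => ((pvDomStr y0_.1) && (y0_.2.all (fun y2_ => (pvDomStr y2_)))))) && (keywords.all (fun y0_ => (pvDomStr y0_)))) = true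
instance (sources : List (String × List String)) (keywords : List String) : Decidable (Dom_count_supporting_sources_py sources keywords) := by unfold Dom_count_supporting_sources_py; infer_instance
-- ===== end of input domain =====

-- B replaces A's per-source scan by deduplicated keywords driving keyword-outer rounds over a
-- shrinking worklist of still-unsupported pre-lowered sources; objective: alternative (not faster).


-- ===== PORT A =====
-- inner 'for raw in src_lines: … break' loop of A
def pvScanLines (kws : List String) : List String → Bool
  | [] => false
  | raw :: rest =>
    let lowered := PySem.Str.lower raw
    if kws.any (fun kw => PySem.Str.isIn kw lowered) then true
    else pvScanLines kws rest

def count_supporting_sources_py (sources : List (String × List String)) (keywords : List String) : Int :=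
  let lowered_keywords := (keywords.filter (fun kw => kw ≠ "")).map PySem.Str.lower
  if lowered_keywords.isEmpty then 0
  else
    sources.foldl (fun support p =>
      if pvScanLines lowered_keywords p.2 then support + 1 else support) 0

-- ===== PORT B =====
-- body of B's inner 'for src in remaining' loop: resolve src (count it) or keep it on the worklist
def pvStep (kw : String) (acc : Int × List (List String)) (src : List String) : Int × List (List String) :=
  if src.any (fun line => PySem.Str.isIn kw line) then (acc.1 + 1, acc.2)
  else (acc.1, acc.2 ++ [src])

def count_supporting_sources_py_alt (sources : List (String × List String)) (keywords : List String) : Int :=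
  let kws := PySem.List.dedup ((keywords.filter (fun kw => kw ≠ "")).map PySem.Str.lower)
  let remaining := sources.map (fun p => p.2.map PySem.Str.lower)
  (kws.foldl (fun st kw => st.2.foldl (pvStep kw) (st.1, ([] : List (List String)))) ((0 : Int), remaining)).1

-- ===== PRECONDITION & SPEC =====
def Spec_count_supporting_sources_py (sources : List (String × List String)) (keywords : List String) (out : Int) : Prop := out = count_supporting_sources_py_alt sources keywords
instance (sources : List (String × List String)) (keywords : List String) (out : Int) : Decidable (Spec_count_supporting_sources_py sources keywords out) := by unfold Spec_count_supporting_sources_py; infer_instance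

-- ===== CLAIM (what is proved, stated in full; the proofs are below) =====
def Claim_equal_count_supporting_sources_py : Prop := ∀ (sources : List (String × List String)) (keywords : List String), Dom_count_supporting_sources_py sources keywords → Spec_count_supporting_sources_py sources keywords (count_supporting_sources_py sources keywords)

-- ===== LEMMAS AND PROOFS =====
-- one round of B: hits grow by the number of resolved sources, the worklist keeps the rest
theorem pv_round (kw : String) (rem : List (List String)) (h : Int) (acc : List (List String)) :
    rem.foldl (pvStep kw) (h, acc)
      = (h + (rem.countP (fun src => src.any (fun line => PySem.Str.isIn kw line)) : Int),
         acc ++ rem.filter (fun src => !src.any (fun line => PySem.Str.isIn kw line))) := by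
  induction rem generalizing h acc with
  | nil => simp
  | cons s rest ih =>
    rw [List.foldl_cons]
    by_cases hp : s.any (fun line => PySem.Str.isIn kw line) = true
    · have hs : pvStep kw (h, acc) s = (h + 1, acc) := by unfold pvStep; rw [if_pos hp]
      rw [hs, ih, List.countP_cons, if_pos hp, List.filter_cons, if_neg (by rw [hp]; decide)]
      rw [Prod.mk.injEq]
      exact ⟨by push_cast; ring, rfl⟩
    · have hs : pvStep kw (h, acc) s = (h, acc ++ [s]) := by unfold pvStep; rw [if_neg hp]
      rw [hs, ih, List.countP_cons, if_neg hp, List.filter_cons,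
          if_pos (by rw [Bool.not_eq_true] at hp; rw [hp]; decide)]
      rw [Prod.mk.injEq]
      exact ⟨by push_cast; ring, by simp⟩

-- splitting a countP of a disjunction against a filter of the negation
theorem pv_countP_or {α : Type} (l : List α) (p q : α → Bool) :
    l.countP (fun x => p x || q x) = l.countP p + (l.filter (fun x => !p x)).countP q := by
  induction l with
  | nil => rfl
  | cons x xs ih =>
    simp only [List.countP_cons, List.filter_cons]
    cases hp : p x <;> cases hq : q x <;> simp [hq, ih] <;> omega

-- B's whole keyword loop counts the sources supported by any of the keywords
theorem pv_loop (kws : List String) (rem : List (List String)) (h : Int) :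
    (kws.foldl (fun st kw => st.2.foldl (pvStep kw) (st.1, ([] : List (List String)))) (h, rem)).1
      = h + (rem.countP (fun src => kws.any (fun kw => src.any (fun line => PySem.Str.isIn kw line))) : Int) := by
  induction kws generalizing rem h with
  | nil => simp
  | cons k rest ih =>
    rw [List.foldl_cons, pv_round]
    simp only [List.nil_append]
    rw [ih]
    simp only [List.any_cons]
    rw [pv_countP_or rem (fun src => src.any (fun line => PySem.Str.isIn k line))]
    push_cast
    ring

-- A's line-outer scan with break equals the keyword/line disjunction over lowered lines
theorem pvScanLines_eq (kws : List String) (lines : List String) :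
    pvScanLines kws lines
      = (lines.map PySem.Str.lower).any (fun line => kws.any (fun kw => PySem.Str.isIn kw line)) := by
  induction lines with
  | nil => simp [pvScanLines]
  | cons raw rest ih =>
    simp only [pvScanLines, List.map_cons, List.any_cons]
    by_cases hp : kws.any (fun kw => PySem.Str.isIn kw (PySem.Str.lower raw)) = true
    · rw [if_pos hp, hp, Bool.true_or]
    · rw [if_neg hp, ih]
      rw [Bool.not_eq_true] at hp
      rw [hp, Bool.false_or]

-- deduplication does not change an 'any'
theorem pv_any_dedup {α : Type} [DecidableEq α] (l : List α) (f : α → Bool) :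
    (PySem.List.dedup l).any f = l.any f := by
  rw [Bool.eq_iff_iff]
  simp only [List.any_eq_true]
  constructor
  · rintro ⟨x, hx, hfx⟩; exact ⟨x, (PySem.List.mem_dedup l x).1 hx, hfx⟩
  · rintro ⟨x, hx, hfx⟩; exact ⟨x, (PySem.List.mem_dedup l x).2 hx, hfx⟩

-- swapping the order of two nested 'any's
theorem pv_any_comm {α β : Type} (l : List α) (m : List β) (f : α → β → Bool) :
    l.any (fun a => m.any (f a)) = m.any (fun b => l.any (fun a => f a b)) := by
  rw [Bool.eq_iff_iff]
  simp only [List.any_eq_true]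
  constructor
  · rintro ⟨a, ha, b, hb, hf⟩; exact ⟨b, hb, a, ha, hf⟩
  · rintro ⟨b, hb, a, ha, hf⟩; exact ⟨a, ha, b, hb, hf⟩

-- ===== VERDICT (by name: the statement is the Claim_ definition above) =====
theorem count_supporting_sources_py_spec : Claim_equal_count_supporting_sources_py := by
  intro sources keywords _
  unfold Spec_count_supporting_sources_py count_supporting_sources_py count_supporting_sources_py_alt
  rw [pv_loop]
  set lkw := (keywords.filter (fun kw => kw ≠ "")).map PySem.Str.lower with hlkw
  have hany : ∀ src : List String,
      (PySem.List.dedup lkw).any (fun kw => src.any (fun line => PySem.Str.isIn kw line))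
        = lkw.any (fun kw => src.any (fun line => PySem.Str.isIn kw line)) := fun src =>
    pv_any_dedup lkw _
  simp only [hany]
  by_cases h : lkw.isEmpty
  · have hnil : lkw = [] := List.isEmpty_iff.mp h
    simp [hnil]
  · simp only [h, Bool.false_eq_true, if_false]
    rw [PySem.List.foldl_if_add_one (fun p => pvScanLines lkw p.2) sources 0]
    simp only [pvScanLines_eq, List.countP_map]
    have hpred : ((fun src => lkw.any (fun kw => src.any (fun line => PySem.Str.isIn kw line)))
          ∘ (fun p : String × List String => p.2.map PySem.Str.lower))
        = fun p : String × List String =>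
            (p.2.map PySem.Str.lower).any (fun line => lkw.any (fun kw => PySem.Str.isIn kw line)) := by
      funext p
      rw [Function.comp_apply, pv_any_comm]
    rw [hpred]
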